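-- pv_equiv track=rewrite | github.com/WoosungMichael/Algorithm | CodingTest/CJ/1.py | solution
-- ===== SOURCE A (Python) =====
-- def solution(room):
--     answer = 0
--     row = len(room)
--     col = len(room[0])
--     for i in range(row):
--         for j in range(col):
--             if room[i][j] == '$':
--                 tmp = i
--                 for k in range(i + 1, row):
--                     if room[k][j] == '#':
--                         break
--                     else:
--                         tmp = k
--                 room[tmp] = room[tmp][:j] + '$' + room[tmp][j + 1 :]
--                 answer += 1
--     return answer
-- ===== SOURCE B (Python) =====
-- def solution(room):
--     answer = 0
--     row = len(room)
--     col = len(room[0])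
--     for j in range(col):
--         cnt = 0
--         prev = '#'
--         for i in range(row):
--             c = room[i][j]
--             if c == '#':
--                 if cnt:
--                     answer += cnt if prev == '$' else cnt + 1
--                 cnt = 0
--             elif c == '$':
--                 cnt += 1
--             prev = c
--         if cnt:
--             answer += cnt if prev == '$' else cnt + 1
--     return answer
-- ===== Notes on version B (the rewrite author's own statement) =====
-- stated objective: alternative
-- what changed: Instead of simulating each '$' drop with an inner downward scan plus in-place string rewriting and re-counting the moved '$', B makes a single pass down each column keeping a per-segment '$' count and the previous character, adding cnt (or cnt+1 when the segment's bottom cell is not originally '$') at each '#'/column end; B does not mutate room.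
import Mathlib
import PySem

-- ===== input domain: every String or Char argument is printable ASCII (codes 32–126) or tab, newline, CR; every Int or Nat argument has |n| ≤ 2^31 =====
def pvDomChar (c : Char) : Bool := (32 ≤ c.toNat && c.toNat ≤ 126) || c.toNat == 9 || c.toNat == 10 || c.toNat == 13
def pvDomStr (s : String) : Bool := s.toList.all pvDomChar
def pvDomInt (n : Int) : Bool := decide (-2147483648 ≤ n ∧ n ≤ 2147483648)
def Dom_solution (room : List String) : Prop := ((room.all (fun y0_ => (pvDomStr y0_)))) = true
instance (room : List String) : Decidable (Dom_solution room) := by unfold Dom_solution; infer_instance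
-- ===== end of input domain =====

-- B replaces A's per-'$' downward scan + in-place string rewrite (which re-counts each moved '$')
-- by one pass down each column with a per-segment '$' counter; equivalence is about the return value
-- only: A mutates the caller's list `room` in place, B does not.

-- ===== PORT A =====
-- the `for k in range(i+1, row)` loop body, with the `break` carried as a Bool flag
def tmpStepA (rm : List String) (j : Int) (tb : Int × Bool) (k : Int) : Int × Bool :=
  if tb.2 then tb
  else if (PySem.Str.pyGet? ((PySem.List.pyGet? rm k).getD "") j).getD ' ' = '#' then (tb.1, true)
  else (k, tb.2)

-- the body of the `for j in range(col)` loop; state = (answer, room)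
def cellStepA (row : Nat) (i : Int) (st : Int × List String) (j : Int) : Int × List String :=
  let answer := st.1
  let rm := st.2
  if (PySem.Str.pyGet? ((PySem.List.pyGet? rm i).getD "") j).getD ' ' = '$' then
    let tmp : Int := ((PySem.List.pyRange (i + 1) (row : Int)).foldl (tmpStepA rm j) (i, false)).1
    -- room[tmp] = room[tmp][:j] + '$' + room[tmp][j+1:]  (tmp is always ≥ 0 here)
    let line := (PySem.List.pyGet? rm tmp).getD ""
    let rm' := rm.set tmp.toNat
      (PySem.Str.slice line none (some j) ++ "$" ++ PySem.Str.slice line (some (j + 1)) none)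
    (answer + 1, rm')
  else st

def solution (room : List String) : Int :=
  let row : Nat := room.length
  let col : Int := PySem.Str.len ((PySem.List.pyGet? room 0).getD "")   -- len(room[0]); [] is outside Pre_
  let st := (PySem.List.pyRange 0 (row : Int)).foldl (fun st i =>
    (PySem.List.pyRange 0 col).foldl (cellStepA row i) st) ((0 : Int), room)
  st.1

-- ===== PORT B =====
-- the body of the `for i in range(row)` loop; state = (cnt, prev, answer)
def rowStepB (room : List String) (j : Int) (st : Int × Char × Int) (i : Int) : Int × Char × Int :=
  let c := (PySem.Str.pyGet? ((PySem.List.pyGet? room i).getD "") j).getD ' '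
  let cnt := st.1
  let prev := st.2.1
  let ans := st.2.2
  if c = '#' then
    ((0 : Int), c, if cnt ≠ 0 then (if prev = '$' then ans + cnt else ans + cnt + 1) else ans)
  else if c = '$' then (cnt + 1, c, ans)
  else (cnt, c, ans)

def solution_alt (room : List String) : Int :=
  let row : Nat := room.length
  let col : Int := PySem.Str.len ((PySem.List.pyGet? room 0).getD "")   -- len(room[0]); [] is outside Pre_
  (PySem.List.pyRange 0 col).foldl (fun answer j =>
    let st := (PySem.List.pyRange 0 (row : Int)).foldl (rowStepB room j) ((0 : Int), '#', answer)
    if st.1 ≠ 0 then (if st.2.1 = '$' then st.2.2 + st.1 else st.2.2 + st.1 + 1) else st.2.2) 0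

-- ===== PRECONDITION & SPEC =====
-- Pre_ excludes only inputs on which A raises: the empty list (room[0] IndexError) and grids where
-- some row is shorter than row 0 (string IndexError while scanning column j >= len(room[i])).
def Pre_solution (room : List String) : Prop :=
  room ≠ [] ∧ ∀ s ∈ room, ((room.headD "").toList).length ≤ s.toList.length
instance (room : List String) : Decidable (Pre_solution room) := by unfold Pre_solution; infer_instance

def pvWitness_solution : List String := ["$.#", ".#$", "$$."]

def Spec_solution (room : List String) (out : Int) : Prop := out = solution_alt room
instance (room : List String) (out : Int) : Decidable (Spec_solution room out) := by unfold Spec_solution; infer_instance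

-- ===== CLAIM (what is proved, stated in full; the proofs are below) =====
def Claim_equal_solution : Prop := ∀ (room : List String), Dom_solution room → Pre_solution room → Spec_solution room (solution room)

-- ===== LEMMAS AND PROOFS =====

-- The common specification both programs are reduced to: cell (i,j) is counted by A iff it holds a
-- '$' in the ORIGINAL grid, or it is the landing cell (segment bottom) of some '$' strictly above it.
def gOf (room : List String) : List (List Char) := room.map String.toList
def chAt (g : List (List Char)) (i j : Nat) : Char := (g.getD i []).getD j ' '
def dropB (g : List (List Char)) (j : Nat) : Nat → Nat → Nat
  | 0, i => i
  | fuel+1, i => if chAt g (i+1) j = '#' then i else dropB g j fuel (i+1)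
def botB (g : List (List Char)) (j i : Nat) : Nat := dropB g j (g.length - 1 - i) i
def countedB (g : List (List Char)) (i j : Nat) : Bool :=
  decide (chAt g i j = '$') ||
    (List.range i).any (fun p => decide (chAt g p j = '$') && decide (botB g j p = i))
def fB (g : List (List Char)) (i j : Nat) : Int := if countedB g i j then 1 else 0
def specSum (g : List (List Char)) (C : Nat) : Int :=
  ∑ i ∈ Finset.range g.length, ∑ j ∈ Finset.range C, fB g i j

-- A-side model of the mutated room after scanning all cells before (i,j) in row-major order
def hitB (g : List (List Char)) (C i j r c : Nat) : Bool :=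
  decide (c < C) && (List.range (i+1)).any (fun p =>
    (decide (p < i) || decide (c < j)) && decide (chAt g p c = '$') && decide (botB g c p = r))
def modelL (g : List (List Char)) (C i j : Nat) : List (List Char) :=
  g.mapIdx (fun r rowc => rowc.mapIdx (fun c ch => if hitB g C i j r c then '$' else ch))
def scountD (g : List (List Char)) (C i j : Nat) : Int :=
  (∑ p ∈ Finset.range i, ∑ q ∈ Finset.range C, fB g p q) + ∑ q ∈ Finset.range j, fB g i q

-- generic fold-with-invariant over List.range
theorem foldl_range_inv {σ : Type} (f : σ → Nat → σ) (P : Nat → σ → Prop) (n : Nat) (s0 : σ)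
    (h0 : P 0 s0) (hstep : ∀ k s, k < n → P k s → P (k+1) (f s k)) :
    P n (List.foldl f s0 (List.range n)) := by
  induction n with
  | zero => simpa using h0
  | succ n ih =>
    rw [List.range_succ, List.foldl_append]
    exact hstep n _ (Nat.lt_succ_self n) (ih (fun k s hk => hstep k s (hk.trans (Nat.lt_succ_self n))))

theorem readc (rm : List String) (r c : Nat) :
    (PySem.Str.pyGet? ((PySem.List.pyGet? rm (r:Int)).getD "") (c:Int)).getD ' ' =
      chAt (rm.map String.toList) r c := by
  simp only [chAt, PySem.List.pyGet?_natCast, PySem.Str.pyGet?_natCast, List.getD,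
    List.getElem?_map]
  cases h : rm[r]? with
  | none => simp
  | some s => simp

theorem pyRangeNat (a b : Nat) :
    PySem.List.pyRange (a:Int) (b:Int) = (List.range (b-a)).map (fun k => ((a+k : Nat) : Int)) := by
  rw [PySem.List.pyRange_of_pos _ _ Int.one_pos]
  by_cases h : a < b
  · have hc : ((a:Int) < b) := by exact_mod_cast h
    have h1 : ((b:Int) - a + 1 - 1) / 1 = ((b - a : Nat) : Int) := by
      push_cast [Nat.cast_sub h.le]; ring_nf; simp
    rw [if_pos hc, h1, Int.toNat_natCast]
    apply List.map_congr_left; intro k hk; push_cast; ring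
  · have hc : ¬ ((a:Int) < b) := by exact_mod_cast h
    have hba : b - a = 0 := by omega
    rw [if_neg hc, hba]
    simp

-- ---- facts about botB ----
theorem dropB_le (g : List (List Char)) (j : Nat) :
    ∀ fuel i, dropB g j fuel i ≤ i + fuel := by
  intro fuel
  induction fuel with
  | zero => intro i; simp [dropB]
  | succ n ih =>
    intro i; rw [dropB]; split
    · omega
    · have := ih (i+1); omega

theorem dropB_ge (g : List (List Char)) (j : Nat) :
    ∀ fuel i, i ≤ dropB g j fuel i := by
  intro fuel
  induction fuel with
  | zero => intro i; simp [dropB]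
  | succ n ih =>
    intro i; rw [dropB]; split
    · omega
    · have := ih (i+1); omega

theorem botB_lt (g : List (List Char)) (j i : Nat) (h : i < g.length) : botB g j i < g.length := by
  have := dropB_le g j (g.length - 1 - i) i; unfold botB; omega

theorem botB_not_wall (g : List (List Char)) (j i : Nat) (h : chAt g i j ≠ '#') :
    chAt g (botB g j i) j ≠ '#' := by
  unfold botB
  generalize g.length - 1 - i = fuel
  induction fuel generalizing i with
  | zero => simpa [dropB]
  | succ n ih =>
    rw [dropB]; split
    · exact h
    · exact ih (i+1) (by assumption)

theorem botB_lt_wall (g : List (List Char)) (j i w : Nat) (hiw : i < w)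
    (hw : chAt g w j = '#') : botB g j i < w := by
  unfold botB
  generalize g.length - 1 - i = fuel
  induction fuel generalizing i with
  | zero => simpa [dropB]
  | succ n ih =>
    rw [dropB]; split
    · exact hiw
    · rename_i hne
      refine ih (i+1) ?_
      rcases Nat.lt_or_ge (i+1) w with h | h
      · exact h
      · exfalso; have : i + 1 = w := by omega
        exact hne (this ▸ hw)

theorem botB_succ_wall (g : List (List Char)) (j i : Nat) (h : i < g.length) :
    botB g j i + 1 = g.length ∨ chAt g (botB g j i + 1) j = '#' := by
  unfold botB
  have hf : g.length - 1 - i + i + 1 = g.length := by omega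
  generalize hfe : g.length - 1 - i = fuel at hf ⊢
  clear hfe h
  induction fuel generalizing i with
  | zero => left; simp [dropB]; omega
  | succ n ih =>
    rw [dropB]; split
    · right; assumption
    · exact ih (i+1) (by omega)

theorem botB_eq (g : List (List Char)) (j i b : Nat) (hib : i ≤ b) (hb : b < g.length)
    (hmid : ∀ r, i < r → r ≤ b → chAt g r j ≠ '#')
    (hstop : b + 1 = g.length ∨ chAt g (b+1) j = '#') : botB g j i = b := by
  unfold botB
  have hf : g.length - 1 - i + i + 1 = g.length := by omega
  generalize hfe : g.length - 1 - i = fuel at hf ⊢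
  clear hfe
  induction fuel generalizing i with
  | zero => simp [dropB]; omega
  | succ n ih =>
    rw [dropB]; split
    · rename_i hw
      by_contra hne
      have : i < b := by omega
      exact hmid (i+1) (by omega) (by omega) hw
    · rename_i hw
      rcases Nat.eq_or_lt_of_le hib with rfl | hlt
      · exfalso
        rcases hstop with hs | hs
        · omega
        · exact hw hs
      · exact ih (i+1) (by omega) (fun r h1 h2 => hmid r (by omega) h2) (by omega)

theorem botB_fix (g : List (List Char)) (j p i : Nat) (hp : p < g.length)
    (hb : botB g j p = i) : botB g j i = i := by
  have h1 := botB_succ_wall g j p hp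
  rw [hb] at h1
  have hge : p ≤ i := hb ▸ dropB_ge g j _ p
  have hlt : i < g.length := by
    have := dropB_le g j (g.length - 1 - p) p
    unfold botB at hb; omega
  exact botB_eq g j i i le_rfl hlt (fun r h1 h2 => absurd (by omega : r ≤ i) (by omega)) h1

-- ---- B side: reduce solution_alt to specSum ----
def dInd (g : List (List Char)) (j r : Nat) : Int := if chAt g r j = '$' then 1 else 0

theorem counted_seg (g : List (List Char)) (j s e p : Nat) (hse : s ≤ e) (heR : e ≤ g.length)
    (hleft : s = 0 ∨ chAt g (s-1) j = '#') (hmid : ∀ r, s ≤ r → r < e → chAt g r j ≠ '#')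
    (hright : e = g.length ∨ chAt g e j = '#') (hsp : s ≤ p) (hpe : p < e) :
    countedB g p j = true ↔
      chAt g p j = '$' ∨ (p = e - 1 ∧ ∃ q, s ≤ q ∧ q < p ∧ chAt g q j = '$') := by
  have he1 : e - 1 < g.length := by omega
  have hbot : ∀ q, s ≤ q → q < e → chAt g q j ≠ '#' → botB g j q = e - 1 := by
    intro q h1 h2 _
    exact botB_eq g j q (e-1) (by omega) he1
      (fun r hr1 hr2 => hmid r (by omega) (by omega))
      (by rcases hright with h | h
          · left; omega
          · right; have : e - 1 + 1 = e := by omega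
            rw [this]; exact h)
  simp only [countedB, Bool.or_eq_true, List.any_eq_true, List.mem_range, decide_eq_true_eq,
    Bool.and_eq_true]
  constructor
  · rintro (h | ⟨q, hq, hd, hb⟩)
    · exact Or.inl h
    · right
      have hqs : s ≤ q := by
        by_contra hlt
        rcases hleft with rfl | hwall
        · omega
        · rcases Nat.lt_or_ge q (s-1) with h1 | h1
          · have := botB_lt_wall g j q (s-1) h1 hwall; omega
          · have : q = s - 1 := by omega
            rw [this] at hd; exact (hd ▸ hwall ▸ (by simp : ('#':Char) ≠ '$')) rfl
      have := hbot q hqs (by omega) (by rw [hd]; decide)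
      refine ⟨by omega, q, hqs, hq, hd⟩
  · rintro (h | ⟨rfl, q, hq1, hq2, hq3⟩)
    · exact Or.inl h
    · exact Or.inr ⟨q, hq2, hq3, hbot q hq1 (by omega) (by rw [hq3]; decide)⟩

theorem wall_zero (g : List (List Char)) (j e : Nat) (hw : chAt g e j = '#') :
    fB g e j = 0 := by
  unfold fB
  rw [if_neg]
  simp only [countedB, Bool.or_eq_true, List.any_eq_true, List.mem_range, decide_eq_true_eq,
    Bool.and_eq_true]
  rintro (h | ⟨q, hq, hd, hb⟩)
  · rw [hw] at h; exact absurd h (by decide)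
  · exact botB_not_wall g j q (by rw [hd]; decide) (hb ▸ hw)

theorem seg_sum (g : List (List Char)) (j s e : Nat) (hse : s < e) (heR : e ≤ g.length)
    (hleft : s = 0 ∨ chAt g (s-1) j = '#') (hmid : ∀ r, s ≤ r → r < e → chAt g r j ≠ '#')
    (hright : e = g.length ∨ chAt g e j = '#') :
    (∑ p ∈ Finset.Ico s e, fB g p j) =
      (∑ r ∈ Finset.Ico s e, dInd g j r) +
        (if (∑ r ∈ Finset.Ico s e, dInd g j r) ≠ 0 ∧ chAt g (e-1) j ≠ '$' then 1 else 0) := by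
  have he : e - 1 + 1 = e := by omega
  have hse1 : s ≤ e - 1 := by omega
  have hcs := fun p hsp hpe => counted_seg g j s e p (by omega) heR hleft hmid hright hsp hpe
  have hS0 : (0:Int) ≤ ∑ r ∈ Finset.Ico s (e-1), dInd g j r :=
    Finset.sum_nonneg (fun r _ => by unfold dInd; split <;> simp)
  have hsum_ne : (∑ r ∈ Finset.Ico s (e-1), dInd g j r) ≠ 0 ↔
      ∃ q, s ≤ q ∧ q < e - 1 ∧ chAt g q j = '$' := by
    rw [Ne, Finset.sum_eq_zero_iff_of_nonneg (fun r _ => by unfold dInd; split <;> simp)]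
    constructor
    · intro h
      push_neg at h
      obtain ⟨q, hq, hne⟩ := h
      rw [Finset.mem_Ico] at hq
      refine ⟨q, hq.1, hq.2, ?_⟩
      by_contra hc; exact hne (by unfold dInd; rw [if_neg hc])
    · rintro ⟨q, h1, h2, h3⟩ hall
      have := hall q (Finset.mem_Ico.mpr ⟨h1, h2⟩)
      rw [dInd, if_pos h3] at this; exact one_ne_zero this
  have hIco : ∀ p, p ∈ Finset.Ico s (e-1) → fB g p j = dInd g j p := by
    intro p hp
    rw [Finset.mem_Ico] at hp
    unfold fB dInd
    by_cases hc : chAt g p j = '$'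
    · rw [if_pos ((hcs p hp.1 (by omega)).mpr (Or.inl hc)), if_pos hc]
    · rw [if_neg hc, if_neg]
      intro hcT
      rcases (hcs p hp.1 (by omega)).mp hcT with h | ⟨h1, _⟩
      · exact hc h
      · omega
  have hsplit : ∀ F : Nat → Int, (∑ p ∈ Finset.Ico s e, F p) =
      (∑ p ∈ Finset.Ico s (e-1), F p) + F (e-1) := by
    intro F
    rw [← he, Finset.sum_Ico_succ_top hse1]
    simp [he]
  rw [hsplit (fun p => fB g p j), hsplit (dInd g j), Finset.sum_congr rfl hIco]
  by_cases hc : chAt g (e-1) j = '$'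
  · have h1 : fB g (e-1) j = 1 := by
      unfold fB; rw [if_pos ((hcs (e-1) hse1 (by omega)).mpr (Or.inl hc))]
    have h2 : dInd g j (e-1) = 1 := by unfold dInd; rw [if_pos hc]
    rw [h1, h2, if_neg (by simp [hc])]; ring
  · have h2 : dInd g j (e-1) = 0 := by unfold dInd; rw [if_neg hc]
    by_cases hq : ∃ q, s ≤ q ∧ q < e - 1 ∧ chAt g q j = '$'
    · have h1 : fB g (e-1) j = 1 := by
        unfold fB; rw [if_pos ((hcs (e-1) hse1 (by omega)).mpr (Or.inr ⟨rfl, hq⟩))]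
      rw [h1, h2, if_pos ⟨by rw [add_zero]; exact hsum_ne.mpr hq, hc⟩]; ring
    · have h1 : fB g (e-1) j = 0 := by
        unfold fB; rw [if_neg]
        intro hcT
        rcases (hcs (e-1) hse1 (by omega)).mp hcT with h | ⟨_, h⟩
        · exact hc h
        · exact hq h
      have hS : (∑ r ∈ Finset.Ico s (e-1), dInd g j r) = 0 := by
        by_contra hne; exact hq (hsum_ne.mp hne)
      rw [h1, h2, hS, if_neg (by simp)]; ring

theorem close_eq (g : List (List Char)) (j s e : Nat) (ans cnt : Int) (prev : Char)
    (hse : s ≤ e) (heR : e ≤ g.length)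
    (hleft : s = 0 ∨ chAt g (s-1) j = '#') (hmid : ∀ r, s ≤ r → r < e → chAt g r j ≠ '#')
    (hright : e = g.length ∨ chAt g e j = '#')
    (hcnt : cnt = ∑ r ∈ Finset.Ico s e, dInd g j r)
    (hprev : prev = (if e = 0 then '#' else chAt g (e-1) j)) :
    (if cnt ≠ 0 then (if prev = '$' then ans + cnt else ans + cnt + 1) else ans) =
      ans + ∑ p ∈ Finset.Ico s e, fB g p j := by
  rcases Nat.eq_or_lt_of_le hse with rfl | hlt
  · simp [hcnt]
  · have he0 : e ≠ 0 := by omega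
    rw [if_neg he0] at hprev
    rw [seg_sum g j s e hlt heR hleft hmid hright, ← hcnt, ← hprev]
    by_cases h1 : cnt = 0
    · rw [if_neg (by simp [h1]), if_neg (by simp [h1]), h1]; ring
    · rw [if_pos h1]
      by_cases h2 : prev = '$'
      · rw [if_pos h2, if_neg (by simp [h2])]; ring
      · rw [if_neg h2, if_pos ⟨h1, h2⟩]; ring

def colBodyB (room : List String) (a : Int) (j : Int) : Int :=
  let st := (PySem.List.pyRange 0 (room.length : Int)).foldl (rowStepB room j) ((0 : Int), '#', a)
  if st.1 ≠ 0 then (if st.2.1 = '$' then st.2.2 + st.1 else st.2.2 + st.1 + 1) else st.2.2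

theorem col_eq (room : List String) (j : Nat) (ans0 : Int) :
    colBodyB room ans0 (j : Int) =
      ans0 + ∑ i ∈ Finset.range (gOf room).length, fB (gOf room) i j := by
  have hR : (gOf room).length = room.length := by simp [gOf]
  set g := gOf room with hg
  set R := room.length with hRdef
  simp only [colBodyB]
  rw [PySem.List.pyRange_zero_natCast, List.foldl_map]
  have hmain := foldl_range_inv (fun st k => rowStepB room (j:Int) st (k:Int))
    (fun i st => ∃ s, s ≤ i ∧ (s = 0 ∨ chAt g (s-1) j = '#') ∧
      (∀ r, s ≤ r → r < i → chAt g r j ≠ '#') ∧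
      st.1 = ∑ r ∈ Finset.Ico s i, dInd g j r ∧
      st.2.1 = (if i = 0 then '#' else chAt g (i-1) j) ∧
      st.2.2 = ans0 + ∑ p ∈ Finset.range s, fB g p j)
    R ((0 : Int), '#', ans0)
    ⟨0, le_rfl, Or.inl rfl, fun r h1 h2 => absurd h2 (by omega), by simp, by simp, by simp⟩
    ?_
  · obtain ⟨s, hs1, hs2, hs3, hs4, hs5, hs6⟩ := hmain
    rw [close_eq g j s R _ _ _ hs1 (le_of_eq hR.symm) hs2 hs3
      (Or.inl hR.symm) hs4 hs5, hs6, hR]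
    rw [add_assoc, Finset.range_eq_Ico, Finset.sum_Ico_consecutive _ (Nat.zero_le s) hs1]
  · intro k st hk hP
    obtain ⟨s, hs1, hs2, hs3, hs4, hs5, hs6⟩ := hP
    have hread : (PySem.Str.pyGet? ((PySem.List.pyGet? room (k:Int)).getD "") (j:Int)).getD ' '
        = chAt g k j := readc room k j
    by_cases hwall : chAt g k j = '#'
    · refine ⟨k+1, le_rfl, Or.inr (by simpa using hwall), fun r h1 h2 => absurd h2 (by omega),
        by simp only [rowStepB, hread, if_pos hwall]; simp, ?_, ?_⟩
      · simp only [rowStepB, hread, if_pos hwall]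
        rw [if_neg (Nat.succ_ne_zero k)]
        simp
      · simp only [rowStepB, hread, if_pos hwall]
        rw [close_eq g j s k _ _ _ hs1 (by omega) hs2 hs3 (Or.inr hwall) hs4 hs5, hs6]
        rw [Finset.sum_range_succ, wall_zero g j k hwall, add_zero, add_assoc,
          Finset.range_eq_Ico, Finset.sum_Ico_consecutive _ (Nat.zero_le s) hs1]
    · refine ⟨s, by omega, hs2, ?_, ?_, ?_, ?_⟩
      · intro r h1 h2
        rcases Nat.lt_or_ge r k with h | h
        · exact hs3 r h1 h
        · have : r = k := by omega
          exact this ▸ hwall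
      · simp only [rowStepB, hread, if_neg hwall]
        rw [Finset.sum_Ico_succ_top hs1]
        by_cases hd : chAt g k j = '$'
        · rw [if_pos hd]
          simp only [hs4, dInd, if_pos hd]
        · rw [if_neg hd]
          simp only [hs4, dInd, if_neg hd, add_zero]
      · simp only [rowStepB, hread, if_neg hwall]
        rw [if_neg (Nat.succ_ne_zero k)]
        by_cases hd : chAt g k j = '$' <;> simp [hd]
      · simp only [rowStepB, hread, if_neg hwall]
        by_cases hd : chAt g k j = '$' <;> simp [hd, hs6]

theorem B_eq (room : List String) :
    solution_alt room = specSum (gOf room) ((room.headD "").toList.length) := by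
  have hcol : PySem.Str.len ((PySem.List.pyGet? room 0).getD "") =
      (((room.headD "").toList.length : Nat) : Int) := by
    rcases room with _ | ⟨h, t⟩ <;>
      simp [PySem.Str.len_eq, PySem.List.pyGet?, PySem.List.pyIdx?]
  set C := (room.headD "").toList.length with hC
  show (PySem.List.pyRange 0 (PySem.Str.len ((PySem.List.pyGet? room 0).getD ""))).foldl
      (colBodyB room) 0 = specSum (gOf room) C
  rw [hcol, PySem.List.pyRange_zero_natCast, List.foldl_map]
  have hmain := foldl_range_inv (fun a k => colBodyB room a (k : Int))
    (fun jj a => a = ∑ q ∈ Finset.range jj, ∑ i ∈ Finset.range (gOf room).length,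
      fB (gOf room) i q)
    C 0 (by simp) ?_
  · rw [hmain]
    unfold specSum
    exact Finset.sum_comm
  · intro k a _ ha
    show colBodyB room a (k : Int) =
      ∑ q ∈ Finset.range (k+1), ∑ i ∈ Finset.range (gOf room).length, fB (gOf room) i q
    rw [col_eq room k a, ha, Finset.sum_range_succ]

-- ---- A side: the mutated room after scanning a row-major prefix is modelL ----
theorem length_modelL (g : List (List Char)) (C i j : Nat) :
    (modelL g C i j).length = g.length := by simp [modelL]

theorem getD_modelL (g : List (List Char)) (C i j r : Nat) (hr : r < g.length) :
    (modelL g C i j).getD r [] =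
      (g.getD r []).mapIdx (fun c ch => if hitB g C i j r c then '$' else ch) := by
  rw [List.getD_eq_getElem _ _ (by simpa [length_modelL] using hr),
      List.getD_eq_getElem _ _ hr]
  simp [modelL]

theorem chAt_modelL (g : List (List Char)) (C i j r c : Nat) (hr : r < g.length)
    (hc : c < (g.getD r []).length) :
    chAt (modelL g C i j) r c = if hitB g C i j r c then '$' else chAt g r c := by
  unfold chAt
  rw [getD_modelL g C i j r hr,
      List.getD_eq_getElem _ _ (by simpa using hc),
      List.getD_eq_getElem _ _ hc]
  simp

theorem hitB_not_wall (g : List (List Char)) (C i j r c : Nat)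
    (h : hitB g C i j r c = true) : chAt g r c ≠ '#' := by
  simp only [hitB, Bool.and_eq_true, List.any_eq_true, List.mem_range, decide_eq_true_eq,
    Bool.or_eq_true] at h
  obtain ⟨-, p, -, ⟨-, hd⟩, hb⟩ := h
  exact hb ▸ botB_not_wall g c p (by rw [hd]; decide)

theorem chAt_modelL_wall (g : List (List Char)) (C i j r c : Nat) (hr : r < g.length)
    (hc : c < (g.getD r []).length) :
    chAt (modelL g C i j) r c = '#' ↔ chAt g r c = '#' := by
  rw [chAt_modelL g C i j r c hr hc]
  by_cases h : hitB g C i j r c = true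
  · rw [if_pos h]
    constructor
    · intro hx; exact absurd hx (by decide)
    · intro hx; exact absurd hx (hitB_not_wall g C i j r c h)
  · rw [if_neg h]

theorem hit_succ (g : List (List Char)) (C i j r c : Nat) (hj : j < C) :
    hitB g C i (j+1) r c = true ↔
      (hitB g C i j r c = true ∨ (c = j ∧ chAt g i j = '$' ∧ botB g j i = r)) := by
  simp only [hitB, Bool.and_eq_true, List.any_eq_true, List.mem_range, decide_eq_true_eq,
    Bool.or_eq_true]
  constructor
  · rintro ⟨hC, p, hp, ⟨hpc, hd⟩, hb⟩
    rcases hpc with h | h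
    · exact Or.inl ⟨hC, p, hp, ⟨Or.inl h, hd⟩, hb⟩
    · rcases Nat.lt_or_ge c j with h2 | h2
      · exact Or.inl ⟨hC, p, hp, ⟨Or.inr h2, hd⟩, hb⟩
      · have hcj : c = j := by omega
        rcases Nat.lt_or_ge p i with h3 | h3
        · exact Or.inl ⟨hC, p, hp, ⟨Or.inl h3, hd⟩, hb⟩
        · have hpi : p = i := by omega
          subst hpi; subst hcj
          exact Or.inr ⟨rfl, hd, hb⟩
  · rintro (⟨hC, p, hp, ⟨hpc, hd⟩, hb⟩ | ⟨rfl, hd, hb⟩)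
    · refine ⟨hC, p, hp, ⟨?_, hd⟩, hb⟩
      rcases hpc with h | h
      · exact Or.inl h
      · exact Or.inr (by omega)
    · exact ⟨hj, i, by omega, ⟨Or.inr (by omega), hd⟩, hb⟩

theorem modelL_congr (g : List (List Char)) (C : Nat) {i j i' j' : Nat}
    (h : ∀ r c, r < g.length → c < (g.getD r []).length →
      hitB g C i j r c = hitB g C i' j' r c) : modelL g C i j = modelL g C i' j' := by
  apply List.ext_getElem (by simp [modelL])
  intro r h1 h2
  have hr : r < g.length := by simpa [modelL] using h1
  simp only [modelL, List.getElem_mapIdx]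
  apply List.ext_getElem (by simp)
  intro c hc1 hc2
  simp only [List.getElem_mapIdx]
  have hcl : c < (g.getD r []).length := by
    rw [List.getD_eq_getElem _ _ hr]; simpa using hc1
  rw [h r c hr hcl]

theorem modelL_zero (g : List (List Char)) (C : Nat) : modelL g C 0 0 = g := by
  apply List.ext_getElem (by simp [modelL])
  intro r h1 h2
  simp only [modelL, List.getElem_mapIdx]
  apply List.ext_getElem (by simp)
  intro c hc1 hc2
  simp only [List.getElem_mapIdx]
  have : hitB g C 0 0 r c = false := by
    rw [Bool.eq_false_iff]
    intro h
    simp only [hitB, Bool.and_eq_true, List.any_eq_true, List.mem_range, decide_eq_true_eq,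
      Bool.or_eq_true] at h
    obtain ⟨-, p, hp, ⟨hpc, -⟩, -⟩ := h
    rcases hpc with h | h <;> omega
  rw [this]
  simp

theorem hit_roll (g : List (List Char)) (C i r c : Nat) :
    hitB g C i C r c = hitB g C (i+1) 0 r c := by
  rw [Bool.eq_iff_iff]
  simp only [hitB, Bool.and_eq_true, List.any_eq_true, List.mem_range, decide_eq_true_eq,
    Bool.or_eq_true]
  constructor
  · rintro ⟨hC, p, hp, ⟨hpc, hd⟩, hb⟩
    exact ⟨hC, p, by omega, ⟨Or.inl (by omega), hd⟩, hb⟩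
  · rintro ⟨hC, p, hp, ⟨hpc, hd⟩, hb⟩
    have hpi : p ≤ i := by rcases hpc with h | h <;> omega
    refine ⟨hC, p, by omega, ⟨?_, hd⟩, hb⟩
    exact Or.inr hC

theorem modelL_roll (g : List (List Char)) (C i : Nat) :
    modelL g C i C = modelL g C (i+1) 0 :=
  modelL_congr g C (fun r c _ _ => hit_roll g C i r c)

theorem scount_roll (g : List (List Char)) (C i : Nat) :
    scountD g C i C = scountD g C (i+1) 0 := by
  simp [scountD, Finset.sum_range_succ]

theorem hit_self (g : List (List Char)) (C i j : Nat) (hj : j < C) :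
    hitB g C i j i j = true ↔ (∃ p, p < i ∧ chAt g p j = '$' ∧ botB g j p = i) := by
  simp only [hitB, Bool.and_eq_true, List.any_eq_true, List.mem_range, decide_eq_true_eq,
    Bool.or_eq_true]
  constructor
  · rintro ⟨hC, p, hp, ⟨hpc, hd⟩, hb⟩
    have : p < i := by rcases hpc with h | h <;> omega
    exact ⟨p, this, hd, hb⟩
  · rintro ⟨p, hp, hd, hb⟩
    exact ⟨hj, p, by omega, ⟨Or.inl hp, hd⟩, hb⟩

theorem counted_simp (g : List (List Char)) (i j : Nat) :
    countedB g i j = true ↔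
      (chAt g i j = '$' ∨ ∃ p, p < i ∧ chAt g p j = '$' ∧ botB g j p = i) := by
  simp only [countedB, Bool.or_eq_true, List.any_eq_true, List.mem_range, decide_eq_true_eq,
    Bool.and_eq_true]

theorem modelL_nostep (g : List (List Char)) (C i j : Nat) (hj : j < C)
    (hcnt : countedB g i j = false) : modelL g C i j = modelL g C i (j+1) := by
  apply modelL_congr
  intro r c hr hc
  rw [Bool.eq_iff_iff]
  constructor
  · intro h
    exact (hit_succ g C i j r c hj).mpr (Or.inl h)
  · intro h
    rcases (hit_succ g C i j r c hj).mp h with h | ⟨-, hd, -⟩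
    · exact h
    · exact absurd ((counted_simp g i j).mpr (Or.inl hd)) (by rw [hcnt]; simp)

theorem test_char (g : List (List Char)) (C i j : Nat) (hi : i < g.length) (hj : j < C)
    (hc : j < (g.getD i []).length) :
    chAt (modelL g C i j) i j = '$' ↔ countedB g i j = true := by
  rw [chAt_modelL g C i j i j hi hc]
  by_cases h : hitB g C i j i j = true
  · rw [if_pos h]
    constructor
    · intro _
      exact (counted_simp g i j).mpr (Or.inr ((hit_self g C i j hj).mp h))
    · intro _; rfl
  · rw [if_neg h]
    constructor
    · intro hd; exact (counted_simp g i j).mpr (Or.inl hd)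
    · intro hcnt
      rcases (counted_simp g i j).mp hcnt with h1 | h1
      · exact h1
      · exact absurd ((hit_self g C i j hj).mpr h1) h

theorem rowAt_eq (rm : List String) (r : Nat) :
    ((PySem.List.pyGet? rm (r:Int)).getD "").toList = (rm.map String.toList).getD r [] := by
  simp only [PySem.List.pyGet?_natCast, List.getD, List.getElem?_map]
  cases h : rm[r]? <;> simp

theorem newline_toList (line : String) (j : Nat) (hj : j < line.toList.length) :
    (PySem.Str.slice line none (some (j:Int)) ++ "$" ++
        PySem.Str.slice line (some ((j:Int)+1)) none).toList = line.toList.set j '$' := by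
  rw [String.toList_append, String.toList_append, PySem.Str.toList_slice, PySem.Str.toList_slice,
    PySem.Chars.slice_eq_listSlice, PySem.Chars.slice_eq_listSlice,
    PySem.List.slice_to _ (by positivity),
    PySem.List.slice_from _ (by positivity)]
  have h1 : ((j:Int)).toNat = j := Int.toNat_natCast j
  have h2 : ((j:Int)+1).toNat = j+1 := by omega
  rw [h1, h2, List.set_eq_take_append_cons_drop, if_pos hj]
  simp

theorem modelL_set (g : List (List Char)) (C i j : Nat) (hi : i < g.length) (hj : j < C)
    (hcnt : countedB g i j = true)
    (hlen : ∀ r, r < g.length → C ≤ (g.getD r []).length) :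
    (modelL g C i j).set (botB g j i) (((modelL g C i j).getD (botB g j i) []).set j '$')
      = modelL g C i (j+1) := by
  have hb : botB g j i < g.length := botB_lt g j i hi
  have hkey : hitB g C i (j+1) (botB g j i) j = true := by
    rcases (counted_simp g i j).mp hcnt with hd | ⟨p, hp, hd, hbp⟩
    · exact (hit_succ g C i j (botB g j i) j hj).mpr (Or.inr ⟨rfl, hd, rfl⟩)
    · have hii : botB g j i = i := botB_fix g j p i (by omega) hbp
      rw [hii]
      exact (hit_succ g C i j i j hj).mpr
        (Or.inl ((hit_self g C i j hj).mpr ⟨p, hp, hd, hbp⟩))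
  apply List.ext_getElem (by simp [modelL])
  intro r h1 h2
  have hr : r < g.length := by simpa [modelL] using h2
  rw [List.getElem_set]
  by_cases hrb : botB g j i = r
  · rw [if_pos hrb]
    rw [getD_modelL g C i j _ hb, hrb]
    have hRrow : (modelL g C i (j+1))[r] =
        (g.getD r []).mapIdx (fun c ch => if hitB g C i (j+1) r c then '$' else ch) := by
      rw [← List.getD_eq_getElem _ [] h2, getD_modelL g C i (j+1) r hr]
    rw [hRrow]
    apply List.ext_getElem (by simp)
    intro c hc1 hc2
    have hcl : c < (g.getD r []).length := by simpa using hc2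
    rw [List.getElem_set]
    by_cases hcj : j = c
    · subst hcj
      rw [if_pos rfl, List.getElem_mapIdx, if_pos (hrb ▸ hkey)]
    · rw [if_neg hcj, List.getElem_mapIdx, List.getElem_mapIdx]
      have : hitB g C i j r c = hitB g C i (j+1) r c := by
        rw [Bool.eq_iff_iff]
        constructor
        · intro h
          exact (hit_succ g C i j r c hj).mpr (Or.inl h)
        · intro h
          rcases (hit_succ g C i j r c hj).mp h with h | ⟨hcj2, -, -⟩
          · exact h
          · exact absurd hcj2.symm hcj
      rw [this]
  · rw [if_neg hrb]
    simp only [modelL, List.getElem_mapIdx]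
    apply List.ext_getElem (by simp)
    intro c hc1 hc2
    simp only [List.getElem_mapIdx]
    have : hitB g C i j r c = hitB g C i (j+1) r c := by
      rw [Bool.eq_iff_iff]
      constructor
      · intro h
        exact (hit_succ g C i j r c hj).mpr (Or.inl h)
      · intro h
        rcases (hit_succ g C i j r c hj).mp h with h | ⟨-, -, hbr⟩
        · exact h
        · exact absurd hbr hrb
    rw [this]

theorem tmpStepA_broken (rm : List String) (j : Int) (t : Int) (l : List Int) :
    List.foldl (tmpStepA rm j) (t, true) l = (t, true) := by
  induction l with
  | nil => rfl
  | cons x xs ih => rw [List.foldl_cons]; exact ih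

theorem tmp_eq (rm : List String) (g m : List (List Char)) (j : Nat)
    (hm : rm.map String.toList = m)
    (hw : ∀ k, k < g.length → (chAt m k j = '#' ↔ chAt g k j = '#')) :
    ∀ fuel p, p + fuel < g.length →
      ∃ b : Bool, List.foldl (tmpStepA rm (j:Int)) (((p:Nat):Int), false)
        ((List.range fuel).map (fun k => ((p+1+k : Nat) : Int)))
        = (((dropB g j fuel p : Nat) : Int), b) := by
  intro fuel
  induction fuel with
  | zero => intro p hp; exact ⟨false, by simp [dropB]⟩
  | succ n ih =>
    intro p hp
    rw [List.range_succ_eq_map, List.map_cons, List.foldl_cons, List.map_map]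
    have hrest : (List.map ((fun k => ((p+1+k : Nat) : Int)) ∘ Nat.succ) (List.range n))
        = (List.range n).map (fun k => (((p+1)+1+k : Nat) : Int)) := by
      apply List.map_congr_left; intro k hk
      simp only [Function.comp_apply]
      congr 1
      omega
    have hread : (PySem.Str.pyGet? ((PySem.List.pyGet? rm ((p+1+0 : Nat):Int)).getD "")
        (j:Int)).getD ' ' = chAt m (p+1) j := by
      have := readc rm (p+1+0) j
      rw [hm] at this
      simpa using this
    by_cases hwall : chAt g (p+1) j = '#'
    · have hmw : chAt m (p+1) j = '#' := (hw (p+1) (by omega)).mpr hwall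
      have hstep : tmpStepA rm (j:Int) (((p:Nat):Int), false) ((p+1+0 : Nat):Int)
          = (((p:Nat):Int), true) := by
        simp only [tmpStepA, hread, hmw]
        simp
      rw [hstep, tmpStepA_broken]
      refine ⟨true, ?_⟩
      rw [dropB, if_pos hwall]
    · have hmw : chAt m (p+1) j ≠ '#' := fun hx => hwall ((hw (p+1) (by omega)).mp hx)
      have hstep : tmpStepA rm (j:Int) (((p:Nat):Int), false) ((p+1+0 : Nat):Int)
          = (((p+1:Nat):Int), false) := by
        simp only [tmpStepA, hread]
        simp [hmw]
      rw [hstep, hrest]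
      obtain ⟨b, hfold⟩ := ih (p+1) (by omega)
      refine ⟨b, ?_⟩
      rw [hfold, dropB, if_neg hwall]

theorem A_eq (room : List String) (hpre : Pre_solution room) :
    solution room = specSum (gOf room) ((room.headD "").toList.length) := by
  obtain ⟨hne, hlenS⟩ := hpre
  set C := (room.headD "").toList.length with hC
  set g := gOf room with hg
  have hRg : g.length = room.length := by simp [hg, gOf]
  have hlen : ∀ r, r < g.length → C ≤ (g.getD r []).length := by
    intro r hr
    have hr' : r < room.length := by omega
    have hgr : g.getD r [] = (room[r]'hr').toList := by
      rw [List.getD_eq_getElem _ _ hr]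
      simp [hg, gOf]
    rw [hgr]
    exact hlenS _ (List.getElem_mem hr')
  have hcol : PySem.Str.len ((PySem.List.pyGet? room 0).getD "") = ((C:Nat):Int) := by
    rcases room with _ | ⟨h, t⟩
    · exact absurd rfl hne
    · simp [PySem.Str.len_eq, PySem.List.pyGet?, PySem.List.pyIdx?, hC]
  show ((PySem.List.pyRange 0 (room.length : Int)).foldl (fun st i =>
    (PySem.List.pyRange 0 (PySem.Str.len ((PySem.List.pyGet? room 0).getD ""))).foldl
      (cellStepA room.length i) st) ((0 : Int), room)).1 = specSum g C
  rw [hcol, PySem.List.pyRange_zero_natCast room.length, List.foldl_map]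
  have hmain := foldl_range_inv
    (fun st i => (PySem.List.pyRange 0 ((C:Nat):Int)).foldl (cellStepA room.length (i:Int)) st)
    (fun i st => st.1 = scountD g C i 0 ∧ st.2.map String.toList = modelL g C i 0)
    room.length ((0:Int), room)
    ⟨by simp [scountD], by rw [modelL_zero]; simp [hg, gOf]⟩ ?_
  · obtain ⟨ha, -⟩ := hmain
    rw [ha]
    simp [scountD, specSum, hRg]
  · intro i st hi hP
    show ((PySem.List.pyRange 0 ((C:Nat):Int)).foldl (cellStepA room.length (i:Int)) st).1
        = scountD g C (i+1) 0 ∧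
      ((PySem.List.pyRange 0 ((C:Nat):Int)).foldl
          (cellStepA room.length (i:Int)) st).2.map String.toList = modelL g C (i+1) 0
    rw [PySem.List.pyRange_zero_natCast C, List.foldl_map]
    have hinner := foldl_range_inv
      (fun st j => cellStepA room.length (i:Int) st (j:Int))
      (fun j st => st.1 = scountD g C i j ∧ st.2.map String.toList = modelL g C i j)
      C st hP ?_
    · obtain ⟨ha, hm⟩ := hinner
      exact ⟨by rw [ha, scount_roll], by rw [hm, modelL_roll]⟩
    · intro j st' hj hQ
      obtain ⟨h1, h2⟩ := hQ
      show (cellStepA room.length (i:Int) st' (j:Int)).1 = scountD g C i (j+1) ∧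
        (cellStepA room.length (i:Int) st' (j:Int)).2.map String.toList = modelL g C i (j+1)
      have hiG : i < g.length := by omega
      have hjr : j < (g.getD i []).length := by
        have := hlen i hiG; omega
      have hread : (PySem.Str.pyGet? ((PySem.List.pyGet? st'.2 (i:Int)).getD "")
          (j:Int)).getD ' ' = chAt (modelL g C i j) i j := by
        have := readc st'.2 i j
        rw [h2] at this
        exact this
      by_cases hcnt : countedB g i j = true
      · have hch : chAt (modelL g C i j) i j = '$' :=
          (test_char g C i j hiG hj hjr).mpr hcnt
        have hb : botB g j i < g.length := botB_lt g j i hiG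
        have hcast : ((i:Int) + 1) = (((i+1:Nat)):Int) := by push_cast; ring
        obtain ⟨bfl, hfold⟩ := tmp_eq st'.2 g (modelL g C i j) j h2
          (fun k hk => chAt_modelL_wall g C i j k j hk (by have := hlen k hk; omega))
          (room.length - (i+1)) i (by omega)
        have hfuel : dropB g j (room.length - (i+1)) i = botB g j i := by
          unfold botB
          congr 1
          omega
        have hstep : cellStepA room.length (i:Int) st' (j:Int) =
            (st'.1 + 1, st'.2.set (botB g j i)
              (PySem.Str.slice ((PySem.List.pyGet? st'.2 ((botB g j i : Nat):Int)).getD "")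
                  none (some (j:Int)) ++ "$" ++
                PySem.Str.slice ((PySem.List.pyGet? st'.2 ((botB g j i : Nat):Int)).getD "")
                  (some ((j:Int)+1)) none)) := by
          simp only [cellStepA, hread, hch, if_pos rfl]
          rw [hcast, pyRangeNat (i+1) room.length, hfold, hfuel]
          simp [Int.toNat_natCast]
        rw [hstep]
        constructor
        · rw [h1]
          simp only [scountD]
          rw [Finset.sum_range_succ]
          have : fB g i j = 1 := by unfold fB; rw [if_pos hcnt]
          rw [this]
          ring
        · rw [List.map_set]
          have hline : ((PySem.List.pyGet? st'.2 ((botB g j i : Nat):Int)).getD "").toList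
              = (modelL g C i j).getD (botB g j i) [] := by
            rw [rowAt_eq, h2]
          have hlinelen : j <
              ((PySem.List.pyGet? st'.2 ((botB g j i : Nat):Int)).getD "").toList.length := by
            rw [hline, getD_modelL g C i j _ hb, List.length_mapIdx]
            have := hlen _ hb
            omega
          rw [newline_toList _ j hlinelen, hline, h2, modelL_set g C i j hiG hj hcnt hlen]
      · have hch : chAt (modelL g C i j) i j ≠ '$' := fun hx =>
          hcnt ((test_char g C i j hiG hj hjr).mp hx)
        have hstep : cellStepA room.length (i:Int) st' (j:Int) = st' := by
          simp only [cellStepA, hread]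
          rw [if_neg hch]
        rw [hstep]
        constructor
        · rw [h1]
          simp only [scountD]
          rw [Finset.sum_range_succ]
          have : fB g i j = 0 := by unfold fB; rw [if_neg hcnt]
          rw [this]
          ring
        · rw [h2, modelL_nostep g C i j hj (Bool.eq_false_iff.mpr hcnt)]

-- ===== VERDICT (by name: the statement is the Claim_ definition above) =====
theorem solution_spec : Claim_equal_solution := by
  intro room hdom hpre
  unfold Spec_solution
  rw [A_eq room hpre, B_eq room]
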